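-- pv_equiv track=rewrite | github.com/Bwohanw/forfun | dpalgos/numberof1s.py | minOnes
-- ===== SOURCE A (Python) =====
-- def minOnes(n):
--     elements = [0] * (n+1) #to make 1-based indexing possible
--     elements[1] = 1
--     for i in range(2,n+1):
--         minelements = i #you can always upper bound the number of elements needed by element i with i 1s and adding them all.
--         for j in range(1,i):#don't include i
--             if ((elements[j] + elements[i-j]) < minelements):
--                 minelements = elements[j] + elements[i-j]
--             if (i%j == 0 and j != 1):#we don't want to have j be 1 since we're doing multiplication
--                 if ((elements[j] + elements[i//j]) < minelements):
--                     minelements = elements[j] + elements[i//j]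
--         elements[i] = minelements
--     return elements[n]
-- ===== SOURCE B (Python) =====
-- def minOnes(n):
--     # forward/push DP: treat f[i] as final and relax sums i+j and products i*j,
--     # with inner ranges clamped so only cells <= n are ever touched.
--     f = list(range(n + 1))
--     for i in range(1, n + 1):
--         fi = f[i]
--         for j in range(1, min(i, n - i) + 1):
--             s = fi + f[j]
--             if s < f[i + j]:
--                 f[i + j] = s
--         for j in range(2, min(i, n // i) + 1):
--             s = fi + f[j]
--             if s < f[i * j]:
--                 f[i * j] = s
--     return f[n]
-- ===== Notes on version B (the rewrite author's own statement) =====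
-- stated objective: faster
-- what changed: A pulls each f[i] from all i-1 splits plus trial divisions; B is the dual push DP: once f[i] is final it relaxes the sums f[i+j] (j <= min(i, n-i)) and products f[i*j] (2 <= j <= min(i, n//i)), so the clamped inner ranges visit about half of A's candidate pairs and skip the per-pair divisibility test (intended as faster; a timing run measured B ~2.5-2.8x faster at the sizes both finished).
-- outside the precondition, e.g. on minOnes(0): A raises IndexError, B returns 0
import Mathlib
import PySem

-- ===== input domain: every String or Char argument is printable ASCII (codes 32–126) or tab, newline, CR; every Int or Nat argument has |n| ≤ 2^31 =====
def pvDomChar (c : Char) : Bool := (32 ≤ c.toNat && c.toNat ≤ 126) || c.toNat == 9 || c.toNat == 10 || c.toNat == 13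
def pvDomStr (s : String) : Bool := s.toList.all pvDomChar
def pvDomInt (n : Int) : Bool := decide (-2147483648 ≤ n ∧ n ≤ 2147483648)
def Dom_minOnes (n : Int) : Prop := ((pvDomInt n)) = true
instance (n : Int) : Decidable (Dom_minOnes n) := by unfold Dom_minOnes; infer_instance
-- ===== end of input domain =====

-- B replaces A's pull DP (for each i, scan all splits j and trial-divide) by a push DP:
-- f[i], once final, is pushed forward into the sums i+j (j ≤ min(i, n-i)) and products
-- i*j (2 ≤ j ≤ min(i, n//i)); the clamped inner ranges visit about half of A's pairs
-- (intended as faster; a timing run measured B ≈ 2.5× faster at the sizes it ran).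

-- ===== PORT A =====
def minOnes (n : Int) : Int :=
  let elements := List.replicate (n + 1).toNat (0 : Int)
  let elements := PySem.List.pySetD elements 1 1
  let elements := (PySem.List.pyRange 2 (n + 1) 1).foldl (fun els i =>
    let minelements := (PySem.List.pyRange 1 i 1).foldl (fun minelements j =>
      let minelements :=
        if PySem.List.pyGetD els j 0 + PySem.List.pyGetD els (i - j) 0 < minelements then
          PySem.List.pyGetD els j 0 + PySem.List.pyGetD els (i - j) 0
        else minelements
      if PySem.Int.mod i j = 0 ∧ j ≠ 1 then
        if PySem.List.pyGetD els j 0 + PySem.List.pyGetD els (PySem.Int.floordiv i j) 0 < minelements then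
          PySem.List.pyGetD els j 0 + PySem.List.pyGetD els (PySem.Int.floordiv i j) 0
        else minelements
      else minelements) i
    PySem.List.pySetD els i minelements) elements
  PySem.List.pyGetD elements n 0

-- ===== PORT B =====
def minOnes_alt (n : Int) : Int :=
  let f := PySem.List.pyRange 0 (n + 1) 1
  let f := (PySem.List.pyRange 1 (n + 1) 1).foldl (fun f i =>
    let fi := PySem.List.pyGetD f i 0
    let f := (PySem.List.pyRange 1 (min i (n - i) + 1) 1).foldl (fun f j =>
      let s := fi + PySem.List.pyGetD f j 0
      if s < PySem.List.pyGetD f (i + j) 0 then PySem.List.pySetD f (i + j) s else f) f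
    (PySem.List.pyRange 2 (min i (PySem.Int.floordiv n i) + 1) 1).foldl (fun f j =>
      let s := fi + PySem.List.pyGetD f j 0
      if s < PySem.List.pyGetD f (i * j) 0 then PySem.List.pySetD f (i * j) s else f) f) f
  PySem.List.pyGetD f n 0

-- ===== PRECONDITION & SPEC =====
-- Pre_ excludes exactly the inputs n ≤ 0, on which Python A raises IndexError
-- (elements[1] = 1 on a list of length ≤ 1).
def Pre_minOnes (n : Int) : Prop := 1 ≤ n
instance (n : Int) : Decidable (Pre_minOnes n) := by unfold Pre_minOnes; infer_instance
def pvWitness_minOnes : Int := 5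


def Spec_minOnes (n : Int) (out : Int) : Prop := out = minOnes_alt n
instance (n : Int) (out : Int) : Decidable (Spec_minOnes n out) := by unfold Spec_minOnes; infer_instance

-- ===== CLAIM (what is proved, stated in full; the proofs are below) =====
def Claim_equal_minOnes : Prop := ∀ (n : Int), Dom_minOnes n → Pre_minOnes n → Spec_minOnes n (minOnes n)

-- ===== LEMMAS AND PROOFS =====

-- value of cell k of a table
def pvVal (g : List Int) (k : Nat) : Int := g.getD k 0

-- the integer complexity function (min number of 1s building k from + and *),
-- defined by a growing table so that no well-founded recursion is needed
def pvFstep (t : List Int) (i : Nat) : Int :=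
  if i = 1 then 1
  else
    let g := fun (k : Nat) => t.getD k 0
    let sums := (List.range' 1 (i - 1)).map (fun j => g j + g (i - j))
    let prods := ((List.range' 2 (i - 2)).filter (fun j => i % j == 0)).map (fun j => g j + g (i / j))
    (sums ++ prods).foldl min (i : Int)

def pvFtab : Nat → List Int
  | 0 => [0]
  | (m+1) => pvFtab m ++ [pvFstep (pvFtab m) (m+1)]

def pvF (k : Nat) : Int := (pvFtab k).getD k 0

lemma pvFtab_length (m : Nat) : (pvFtab m).length = m + 1 := by
  induction m with
  | zero => rfl
  | succ m ih => simp [pvFtab, ih]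

lemma pvF_succ (m : Nat) : pvF (m+1) = pvFstep (pvFtab m) (m+1) := by
  have h := pvFtab_length m
  simp [pvF, pvFtab, h]

lemma pvFtab_getD {k m : Nat} (hk : k ≤ m) : (pvFtab m).getD k 0 = pvF k := by
  induction m with
  | zero => interval_cases k; rfl
  | succ m ih =>
    rcases Nat.lt_or_ge k (m+1) with h | h
    · rw [pvFtab, List.getD_append _ _ _ _ (by rw [pvFtab_length]; omega)]
      exact ih (by omega)
    · have : k = m + 1 := by omega
      subst this; exact (pvF_succ m).symm ▸ (pvF_succ m) ▸ rfl

-- min-fold facts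
lemma pvFoldlMin_le_init (l : List Int) (a : Int) : l.foldl min a ≤ a := by
  induction l generalizing a with
  | nil => exact le_refl a
  | cons x l ih => exact le_trans (ih (min a x)) (min_le_left a x)

lemma pvFoldlMin_le_mem {x : Int} : ∀ (l : List Int), x ∈ l → ∀ (a : Int), l.foldl min a ≤ x := by
  intro l
  induction l with
  | nil => intro h; cases h
  | cons y l ih =>
    intro h a
    rw [List.foldl_cons]
    rcases List.mem_cons.mp h with rfl | h
    · exact le_trans (pvFoldlMin_le_init l (min a x)) (min_le_right a x)
    · exact ih h (min a y)

lemma pvFoldlMin_cases (l : List Int) (a : Int) : l.foldl min a = a ∨ l.foldl min a ∈ l := by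
  induction l generalizing a with
  | nil => exact Or.inl rfl
  | cons x l ih =>
    rw [List.foldl_cons]
    rcases ih (min a x) with h | h
    · rw [h]
      rcases le_total a x with hax | hax
      · exact Or.inl (min_eq_left hax)
      · exact Or.inr (by rw [min_eq_right hax]; exact List.mem_cons_self ..)
    · exact Or.inr (List.mem_cons_of_mem x h)

lemma pvFoldlMin_flat {α : Type} (l : List α) (g : α → List Int) (a : Int) :
    l.foldl (fun acc j => (g j).foldl min acc) a = (l.flatMap g).foldl min a := by
  induction l generalizing a with
  | nil => rfl
  | cons x l ih => simp [List.flatMap_cons, List.foldl_append, ih]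

lemma pv_ite_min (x a : Int) : (if x < a then x else a) = min a x := by
  rcases le_total a x with h | h
  · simp [min_eq_left h]; omega
  · simp [min_eq_right h]; omega

-- the recurrence for pvF, with table lookups replaced by pvF itself
def pvCands (i : Nat) : List Int :=
  (List.range' 1 (i - 1)).map (fun j => pvF j + pvF (i - j)) ++
  ((List.range' 2 (i - 2)).filter (fun j => i % j == 0)).map (fun j => pvF j + pvF (i / j))

lemma pv_two_le_div {j i : Nat} (hd : j ∣ i) (hj : 1 ≤ j) (hji : j < i) : 2 ≤ i / j := by
  rcases hd with ⟨k, rfl⟩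
  have hk : 2 ≤ k := by nlinarith
  rw [Nat.mul_div_cancel_left _ (by omega)]
  exact hk

lemma pvF_eq {i : Nat} (h2 : 2 ≤ i) : pvF i = (pvCands i).foldl min (i : Int) := by
  obtain ⟨m, rfl⟩ : ∃ m, i = m + 1 := ⟨i - 1, by omega⟩
  rw [pvF_succ]
  simp only [pvFstep, pvCands]
  rw [if_neg (by omega)]
  congr 2
  · apply List.map_congr_left
    intro j hj
    rw [List.mem_range'_1] at hj
    rw [pvFtab_getD (by omega), pvFtab_getD (by omega)]
  · apply List.map_congr_left
    intro j hj
    have hj' := List.mem_range'_1.mp (List.mem_of_mem_filter hj)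
    have hd : (m + 1) / j < m + 1 := Nat.div_lt_self (by omega) (by omega)
    rw [pvFtab_getD (by omega), pvFtab_getD (by omega)]

lemma pvF_le_self (i : Nat) : pvF i ≤ (i : Int) := by
  match i with
  | 0 => decide
  | 1 => decide
  | (m+2) => rw [pvF_eq (by omega)]; exact pvFoldlMin_le_init _ _

lemma pvF_le_sum {a b : Nat} (ha : 1 ≤ a) (hb : 1 ≤ b) : pvF (a + b) ≤ pvF a + pvF b := by
  rw [pvF_eq (by omega)]
  apply pvFoldlMin_le_mem
  apply List.mem_append_left
  exact List.mem_map.mpr ⟨a, List.mem_range'_1.mpr ⟨by omega, by omega⟩,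
    by rw [show a + b - a = b by omega]⟩

lemma pvF_le_prod {a b : Nat} (ha : 2 ≤ a) (hb : 2 ≤ b) : pvF (a * b) ≤ pvF a + pvF b := by
  have hab : a < a * b := by nlinarith
  rw [pvF_eq (by nlinarith)]
  apply pvFoldlMin_le_mem
  apply List.mem_append_right
  refine List.mem_map.mpr ⟨a, List.mem_filter.mpr ⟨List.mem_range'_1.mpr ⟨by omega, by omega⟩, ?_⟩, ?_⟩
  · simp [Nat.mul_mod_right]
  · rw [Nat.mul_div_cancel_left b (by omega)]

lemma pvF_attain {i : Nat} (h2 : 2 ≤ i) :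
    pvF i = (i : Int) ∨
    (∃ a b : Nat, 1 ≤ a ∧ 1 ≤ b ∧ a + b = i ∧ pvF i = pvF a + pvF b) ∨
    (∃ a b : Nat, 2 ≤ a ∧ 2 ≤ b ∧ a * b = i ∧ pvF i = pvF a + pvF b) := by
  rw [pvF_eq h2]
  rcases pvFoldlMin_cases (pvCands i) i with h | h
  · exact Or.inl h
  · rcases List.mem_append.mp h with hs | hp
    · obtain ⟨j, hj, hval⟩ := List.mem_map.mp hs
      rw [List.mem_range'_1] at hj
      exact Or.inr (Or.inl ⟨j, i - j, by omega, by omega, by omega, hval.symm⟩)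
    · obtain ⟨j, hjf, hval⟩ := List.mem_map.mp hp
      obtain ⟨hjr, hjm⟩ := List.mem_filter.mp hjf
      rw [List.mem_range'_1] at hjr
      have hd : j ∣ i := Nat.dvd_of_mod_eq_zero (by simpa using hjm)
      refine Or.inr (Or.inr ⟨j, i / j, by omega, pv_two_le_div hd (by omega) (by omega), Nat.mul_div_cancel' hd, hval.symm⟩)

lemma pvGetD_int (xs : List Int) {i : Int} (d : Int) (h : 0 ≤ i) :
    PySem.List.pyGetD xs i d = xs.getD i.toNat d := by
  obtain ⟨k, rfl⟩ : ∃ k : Nat, i = (k : Int) := ⟨i.toNat, by omega⟩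
  simp [PySem.List.pyGetD_natCast]

lemma pvVal_set (g : List Int) (t k : Nat) (v : Int) :
    pvVal (g.set t v) k = if t = k ∧ t < g.length then v else pvVal g k := by
  simp only [pvVal, List.getD_eq_getElem?_getD, List.getElem?_set]
  split_ifs with h1 h2 h3 h4 <;> (simp_all; try omega)

-- ---------- PULL (port A) ----------

def pvStepA (els : List Int) (i : Int) : List Int :=
    let minelements := (PySem.List.pyRange 1 i 1).foldl (fun minelements j =>
      let minelements :=
        if PySem.List.pyGetD els j 0 + PySem.List.pyGetD els (i - j) 0 < minelements then
          PySem.List.pyGetD els j 0 + PySem.List.pyGetD els (i - j) 0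
        else minelements
      if PySem.Int.mod i j = 0 ∧ j ≠ 1 then
        if PySem.List.pyGetD els j 0 + PySem.List.pyGetD els (PySem.Int.floordiv i j) 0 < minelements then
          PySem.List.pyGetD els j 0 + PySem.List.pyGetD els (PySem.Int.floordiv i j) 0
        else minelements
      else minelements) i
    PySem.List.pySetD els i minelements

lemma minOnes_eq_loop (n : Int) :
    minOnes n = PySem.List.pyGetD
      ((PySem.List.pyRange 2 (n + 1) 1).foldl pvStepA
        (PySem.List.pySetD (List.replicate (n + 1).toNat (0 : Int)) 1 1)) n 0 := rfl

def pvTabShape (N m : Nat) : List Int := (List.range (m+1)).map pvF ++ List.replicate (N - m) 0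

lemma pvTabShape_getD {N m k : Nat} (hk : k ≤ m) : (pvTabShape N m).getD k 0 = pvF k := by
  unfold pvTabShape
  rw [List.getD_append _ _ _ _ (by simp only [List.length_map, List.length_range]; omega)]
  rw [List.getD_eq_getElem _ _ (by simp only [List.length_map, List.length_range]; omega)]
  simp only [List.getElem_map, List.getElem_range]

def pvCandsA (els : List Int) (i j : Int) : List Int :=
  (PySem.List.pyGetD els j 0 + PySem.List.pyGetD els (i - j) 0) ::
  (if PySem.Int.mod i j = 0 ∧ j ≠ 1 then
    [PySem.List.pyGetD els j 0 + PySem.List.pyGetD els (PySem.Int.floordiv i j) 0] else [])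

lemma pvBodyA_eq (els : List Int) (i acc j : Int) :
    (let minelements :=
        if PySem.List.pyGetD els j 0 + PySem.List.pyGetD els (i - j) 0 < acc then
          PySem.List.pyGetD els j 0 + PySem.List.pyGetD els (i - j) 0
        else acc
      if PySem.Int.mod i j = 0 ∧ j ≠ 1 then
        if PySem.List.pyGetD els j 0 + PySem.List.pyGetD els (PySem.Int.floordiv i j) 0 < minelements then
          PySem.List.pyGetD els j 0 + PySem.List.pyGetD els (PySem.Int.floordiv i j) 0
        else minelements
      else minelements) = (pvCandsA els i j).foldl min acc := by
  unfold pvCandsA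
  simp only [pv_ite_min]
  split_ifs with h <;> simp only [List.foldl_cons, List.foldl_nil]

lemma pvInnerA_eq (els : List Int) (i init : Int) :
    (PySem.List.pyRange 1 i 1).foldl (fun minelements j =>
      let minelements :=
        if PySem.List.pyGetD els j 0 + PySem.List.pyGetD els (i - j) 0 < minelements then
          PySem.List.pyGetD els j 0 + PySem.List.pyGetD els (i - j) 0
        else minelements
      if PySem.Int.mod i j = 0 ∧ j ≠ 1 then
        if PySem.List.pyGetD els j 0 + PySem.List.pyGetD els (PySem.Int.floordiv i j) 0 < minelements then
          PySem.List.pyGetD els j 0 + PySem.List.pyGetD els (PySem.Int.floordiv i j) 0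
        else minelements
      else minelements) init
    = ((PySem.List.pyRange 1 i 1).flatMap (pvCandsA els i)).foldl min init := by
  rw [show (fun (minelements j : Int) =>
      let minelements :=
        if PySem.List.pyGetD els j 0 + PySem.List.pyGetD els (i - j) 0 < minelements then
          PySem.List.pyGetD els j 0 + PySem.List.pyGetD els (i - j) 0
        else minelements
      if PySem.Int.mod i j = 0 ∧ j ≠ 1 then
        if PySem.List.pyGetD els j 0 + PySem.List.pyGetD els (PySem.Int.floordiv i j) 0 < minelements then
          PySem.List.pyGetD els j 0 + PySem.List.pyGetD els (PySem.Int.floordiv i j) 0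
        else minelements
      else minelements) = fun (acc j : Int) => (pvCandsA els i j).foldl min acc from
    funext fun acc => funext fun j => pvBodyA_eq els i acc j]
  exact pvFoldlMin_flat _ _ _

lemma pvInnerA_val {N m : Nat} (h1 : 1 ≤ m) (_hm : m + 1 ≤ N) :
    ((PySem.List.pyRange 1 ((m : Int) + 1) 1).flatMap
      (pvCandsA (pvTabShape N m) ((m : Int) + 1))).foldl min ((m : Int) + 1) = pvF (m+1) := by
  have hget : ∀ (j : Int), 0 ≤ j → j.toNat ≤ m →
      PySem.List.pyGetD (pvTabShape N m) j 0 = pvF j.toNat := by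
    intro j hj0 hjm
    rw [pvGetD_int _ _ hj0]
    exact pvTabShape_getD hjm
  have hgetn : ∀ (a : Nat), a ≤ m → PySem.List.pyGetD (pvTabShape N m) (a : Int) 0 = pvF a := by
    intro a hma
    rw [hget _ (by omega) (by simp; omega)]
    simp
  apply le_antisymm
  · rcases pvF_attain (show 2 ≤ m+1 by omega) with hA | ⟨a, b, ha, hb, hab, heq⟩ | ⟨a, b, ha, hb, hab, heq⟩
    · calc _ ≤ ((m : Int) + 1) := pvFoldlMin_le_init _ _
        _ = pvF (m+1) := by rw [hA]; push_cast; ring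
    · have hc1 : PySem.List.pyGetD (pvTabShape N m) (a : Int) 0 +
          PySem.List.pyGetD (pvTabShape N m) ((m : Int) + 1 - (a : Int)) 0 = pvF a + pvF b := by
        rw [hgetn a (by omega), show ((m : Int) + 1 - (a : Int)) = ((b : Nat) : Int) by omega,
          hgetn b (by omega)]
      have hmem : pvF a + pvF b ∈ (PySem.List.pyRange 1 ((m : Int) + 1) 1).flatMap
          (pvCandsA (pvTabShape N m) ((m : Int) + 1)) := by
        refine List.mem_flatMap.mpr ⟨(a : Int), PySem.List.mem_pyRange_one.mpr
          ⟨by exact_mod_cast ha, by omega⟩, ?_⟩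
        unfold pvCandsA
        rw [hc1]
        exact List.mem_cons_self ..
      exact le_of_le_of_eq (pvFoldlMin_le_mem _ hmem _) heq.symm
    · have ham : a ≤ m := by nlinarith
      have hbm : b ≤ m := by nlinarith
      have hcond : PySem.Int.mod ((m : Int) + 1) (a : Int) = 0 ∧ (a : Int) ≠ 1 := by
        constructor
        · rw [PySem.Int.mod_eq_zero_iff_dvd]
          exact ⟨(b : Int), by exact_mod_cast hab.symm⟩
        · exact_mod_cast (by omega : a ≠ 1)
      have hfd : PySem.Int.floordiv ((m : Int) + 1) (a : Int) = ((b : Nat) : Int) := by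
        rw [show ((m : Int) + 1) = (((m + 1 : Nat)) : Int) by push_cast; ring,
          PySem.Int.floordiv_natCast, ← hab, Nat.mul_div_cancel_left b (by omega)]
      have hc2 : PySem.List.pyGetD (pvTabShape N m) (a : Int) 0 +
          PySem.List.pyGetD (pvTabShape N m) (PySem.Int.floordiv ((m : Int) + 1) (a : Int)) 0
          = pvF a + pvF b := by
        rw [hgetn a ham, hfd, hgetn b hbm]
      have hmem : pvF a + pvF b ∈ (PySem.List.pyRange 1 ((m : Int) + 1) 1).flatMap
          (pvCandsA (pvTabShape N m) ((m : Int) + 1)) := by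
        refine List.mem_flatMap.mpr ⟨(a : Int), PySem.List.mem_pyRange_one.mpr
          ⟨by exact_mod_cast (by omega : 1 ≤ a), by omega⟩, ?_⟩
        unfold pvCandsA
        refine List.mem_cons_of_mem _ ?_
        rw [if_pos hcond, List.mem_singleton]
        exact hc2.symm
      exact le_of_le_of_eq (pvFoldlMin_le_mem _ hmem _) heq.symm
  · rcases pvFoldlMin_cases _ _ with hc | hc
    · rw [hc]
      have := pvF_le_self (m+1)
      push_cast at this ⊢
      exact this
    · obtain ⟨j, hj, hx⟩ := List.mem_flatMap.mp hc
      rw [PySem.List.mem_pyRange_one] at hj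
      obtain ⟨jn, rfl⟩ : ∃ jn : Nat, j = (jn : Int) := ⟨j.toNat, by omega⟩
      have hjn1 : 1 ≤ jn := by exact_mod_cast hj.1
      have hjnm : jn < m + 1 := by exact_mod_cast (by omega : (jn : Int) < ((m + 1 : Nat) : Int))
      unfold pvCandsA at hx
      rcases List.mem_cons.mp hx with heq | hx2
      · refine le_of_le_of_eq ?_ heq.symm
        rw [hgetn jn (by omega), show ((m : Int) + 1 - (jn : Int)) = ((m + 1 - jn : Nat) : Int)
          by omega, hgetn (m + 1 - jn) (by omega)]
        calc pvF (m+1) = pvF (jn + (m + 1 - jn)) := by rw [show jn + (m + 1 - jn) = m + 1 by omega]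
          _ ≤ pvF jn + pvF (m + 1 - jn) := pvF_le_sum (by omega) (by omega)
      · split_ifs at hx2 with hcond
        · obtain ⟨hmod, hne1⟩ := hcond
          rw [List.mem_singleton] at hx2
          have hdvd : jn ∣ m + 1 := by
            have h2 : ((jn : Int)) ∣ ((m : Int) + 1) := (PySem.Int.mod_eq_zero_iff_dvd _ _).mp hmod
            have h3 : ((jn : Int)) ∣ (((m + 1 : Nat)) : Int) := by push_cast; exact_mod_cast h2
            exact_mod_cast h3
          have hjn2 : 2 ≤ jn := by
            have : jn ≠ 1 := by exact_mod_cast hne1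
            omega
          have hdivm : (m + 1) / jn ≤ m := by
            have := Nat.div_lt_self (show 0 < m + 1 by omega) (show 1 < jn by omega)
            omega
          refine le_of_le_of_eq ?_ hx2.symm
          rw [show PySem.Int.floordiv ((m : Int) + 1) (jn : Int) = (((m + 1) / jn : Nat) : Int) by
              rw [show ((m : Int) + 1) = (((m + 1 : Nat)) : Int) by push_cast; ring]
              exact PySem.Int.floordiv_natCast _ _]
          rw [hgetn jn (by omega), hgetn _ hdivm]
          calc pvF (m+1) = pvF (jn * ((m + 1) / jn)) := by rw [Nat.mul_div_cancel' hdvd]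
            _ ≤ pvF jn + pvF ((m + 1) / jn) := pvF_le_prod hjn2 (pv_two_le_div hdvd (by omega) hjnm)
        · cases hx2

lemma pvStepA_eq {N m : Nat} (h1 : 1 ≤ m) (hm : m + 1 ≤ N) :
    pvStepA (pvTabShape N m) ((m : Int) + 1) = pvTabShape N (m+1) := by
  unfold pvStepA
  rw [pvInnerA_eq, pvInnerA_val h1 hm]
  rw [PySem.List.pySetD_of_nonneg _ _ (by positivity)]
  rw [show ((m : Int) + 1).toNat = m + 1 by omega]
  unfold pvTabShape
  rw [List.set_append, if_neg (by simp only [List.length_map, List.length_range]; omega)]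
  simp only [List.length_map, List.length_range]
  rw [show m + 1 - (m + 1) = 0 by omega]
  rw [show N - m = (N - m - 1) + 1 by omega, List.replicate_succ, List.set_cons_zero]
  rw [show N - m - 1 = N - (m + 1) by omega]
  conv_rhs => rw [List.range_succ, List.map_append]
  rw [List.append_assoc]
  rfl

lemma pvF_zero : pvF 0 = 0 := by decide

lemma pvF_one : pvF 1 = 1 := by decide

lemma pvInit_eq {N : Nat} (h : 1 ≤ N) :
    (List.replicate (N + 1) (0 : Int)).set 1 1 = pvTabShape N 1 := by
  unfold pvTabShape
  rw [show N + 1 = (N - 1) + 1 + 1 by omega, List.replicate_succ, List.replicate_succ,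
    List.set_cons_succ, List.set_cons_zero]
  rw [show (1:Nat) + 1 = 2 from rfl]
  rw [show List.range 2 = [0, 1] from rfl, List.map_cons, List.map_cons, List.map_nil,
    pvF_zero, pvF_one]
  rfl

lemma pullLoop {n : Int} (hn : 1 ≤ n) {m : Nat} (h1 : 1 ≤ m) (hm : m ≤ n.toNat) :
    (PySem.List.pyRange 2 ((m : Int) + 1) 1).foldl pvStepA
        (PySem.List.pySetD (List.replicate (n + 1).toNat (0 : Int)) 1 1) =
      pvTabShape n.toNat m := by
  induction m with
  | zero => omega
  | succ m ih =>
    rcases Nat.eq_zero_or_pos m with rfl | hp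
    · rw [PySem.List.pyRange_one_eq_nil (by norm_num)]
      rw [List.foldl_nil]
      rw [PySem.List.pySetD_of_nonneg _ _ (by norm_num), show ((1:Int)).toNat = 1 from rfl]
      rw [show (n + 1).toNat = n.toNat + 1 by omega]
      exact pvInit_eq (by omega)
    · rw [show ((↑(m+1) : Int) + 1) = ((↑m + 1) + 1 : Int) by push_cast; ring]
      rw [PySem.List.pyRange_one_succ_right (by omega)]
      rw [List.foldl_append, List.foldl_cons, List.foldl_nil]
      rw [ih hp (by omega)]
      exact pvStepA_eq hp (by omega)

lemma pull_eq {n : Int} (hn : 1 ≤ n) : minOnes n = pvF n.toNat := by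
  obtain ⟨N, rfl⟩ : ∃ N : Nat, n = (N : Int) := ⟨n.toNat, by omega⟩
  have hN1 : 1 ≤ N := by exact_mod_cast hn
  rw [minOnes_eq_loop]
  rw [pullLoop hn hN1 (by simp)]
  rw [pvGetD_int _ _ (by positivity)]
  simp only [Int.toNat_natCast]
  exact pvTabShape_getD (le_refl N)

-- ---------- PUSH (port B) ----------

def pvStepB (n : Int) (f : List Int) (i : Int) : List Int :=
    let fi := PySem.List.pyGetD f i 0
    let f := (PySem.List.pyRange 1 (min i (n - i) + 1) 1).foldl (fun f j =>
      let s := fi + PySem.List.pyGetD f j 0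
      if s < PySem.List.pyGetD f (i + j) 0 then PySem.List.pySetD f (i + j) s else f) f
    (PySem.List.pyRange 2 (min i (PySem.Int.floordiv n i) + 1) 1).foldl (fun f j =>
      let s := fi + PySem.List.pyGetD f j 0
      if s < PySem.List.pyGetD f (i * j) 0 then PySem.List.pySetD f (i * j) s else f) f

lemma minOnes_alt_eq_loop (n : Int) :
    minOnes_alt n = PySem.List.pyGetD
      ((PySem.List.pyRange 1 (n + 1) 1).foldl (pvStepB n) (PySem.List.pyRange 0 (n + 1) 1)) n 0 := rfl

def pvInv (N m : Nat) (g : List Int) : Prop :=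
  g.length = N + 1 ∧
  (∀ k : Nat, k ≤ N → pvF k ≤ pvVal g k) ∧
  (∀ k : Nat, k ≤ N → pvVal g k ≤ (k : Int)) ∧
  (∀ k a b : Nat, k ≤ N → b ≤ a → a ≤ m →
    ((a + b = k ∧ 1 ≤ b) ∨ (a * b = k ∧ 2 ≤ b)) → pvVal g k ≤ pvF a + pvF b)

lemma pvInv_tab {N m : Nat} {g : List Int} (h : pvInv N m g) :
    ∀ k : Nat, k ≤ N → k ≤ m + 1 → pvVal g k = pvF k := by
  obtain ⟨hlen, hlow, hup, hU⟩ := h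
  intro k hkN hkm
  refine le_antisymm ?_ (hlow k hkN)
  rcases Nat.lt_or_ge k 2 with hk2 | hk2
  · interval_cases k
    · rw [pvF_zero]; exact_mod_cast hup 0 hkN
    · rw [pvF_one]; exact_mod_cast hup 1 hkN
  · rcases pvF_attain hk2 with hA | ⟨a, b, ha, hb, hab, heq⟩ | ⟨a, b, ha, hb, hab, heq⟩
    · rw [hA]; exact hup k hkN
    · rcases le_total b a with hba | hba
      · exact le_of_le_of_eq (hU k a b hkN hba (by omega) (Or.inl ⟨hab, hb⟩)) heq.symm
      · exact le_of_le_of_eq (hU k b a hkN hba (by omega) (Or.inl ⟨by omega, ha⟩))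
          (by rw [heq]; ring)
    · have h2a : 2 * a ≤ k := by nlinarith
      have h2b : 2 * b ≤ k := by nlinarith
      rcases le_total b a with hba | hba
      · exact le_of_le_of_eq (hU k a b hkN hba (by omega) (Or.inr ⟨hab, hb⟩)) heq.symm
      · exact le_of_le_of_eq (hU k b a hkN hba (by omega)
          (Or.inr ⟨by rw [Nat.mul_comm]; exact hab, ha⟩)) (by rw [heq]; ring)

-- one relax pass: all effects of folding the update over a list of j's
lemma pvRelaxLoop {N : Nat} {i : Nat} (_hiN : i ≤ N) (fi : Int) (t : Int → Int)
    (hfi : fi = pvF i) (L : List Int)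
    (hjb : ∀ j ∈ L, 1 ≤ j ∧ j ≤ (i : Int))
    (htgt : ∀ j ∈ L, (i : Int) < t j)
    (htN : ∀ j ∈ L, (t j).toNat ≤ N)
    (hF : ∀ j ∈ L, pvF ((t j).toNat) ≤ pvF i + pvF j.toNat)
    {g : List Int}
    (hlen : g.length = N + 1)
    (htab : ∀ k : Nat, k ≤ i → pvVal g k = pvF k)
    (hlow : ∀ k : Nat, k ≤ N → pvF k ≤ pvVal g k) :
    (L.foldl (fun f j =>
        let s := fi + PySem.List.pyGetD f j 0
        if s < PySem.List.pyGetD f (t j) 0 then PySem.List.pySetD f (t j) s else f) g).length = N + 1 ∧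
    (∀ k : Nat, pvVal (L.foldl (fun f j =>
        let s := fi + PySem.List.pyGetD f j 0
        if s < PySem.List.pyGetD f (t j) 0 then PySem.List.pySetD f (t j) s else f) g) k ≤ pvVal g k) ∧
    (∀ k : Nat, k ≤ i → pvVal (L.foldl (fun f j =>
        let s := fi + PySem.List.pyGetD f j 0
        if s < PySem.List.pyGetD f (t j) 0 then PySem.List.pySetD f (t j) s else f) g) k = pvF k) ∧
    (∀ k : Nat, k ≤ N → pvF k ≤ pvVal (L.foldl (fun f j =>
        let s := fi + PySem.List.pyGetD f j 0
        if s < PySem.List.pyGetD f (t j) 0 then PySem.List.pySetD f (t j) s else f) g) k) ∧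
    (∀ j ∈ L, pvVal (L.foldl (fun f j =>
        let s := fi + PySem.List.pyGetD f j 0
        if s < PySem.List.pyGetD f (t j) 0 then PySem.List.pySetD f (t j) s else f) g) ((t j).toNat) ≤ pvF i + pvF j.toNat) := by
  induction L generalizing g with
  | nil =>
    exact ⟨hlen, fun k => le_refl _, htab, hlow, by intro j hj; cases hj⟩
  | cons x L ih =>
    obtain ⟨hx1, hxi⟩ := hjb x (List.mem_cons_self ..)
    have hxt := htgt x (List.mem_cons_self ..)
    have hxN := htN x (List.mem_cons_self ..)
    have hxF := hF x (List.mem_cons_self ..)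
    have hx0 : (0:Int) ≤ x := by omega
    have ht0 : (0:Int) ≤ t x := le_of_lt (lt_of_le_of_lt (by positivity) hxt)
    have htxi : i < (t x).toNat := by omega
    have htxN : (t x).toNat < g.length := by omega
    have hgtx : PySem.List.pyGetD g (t x) 0 = pvVal g ((t x).toNat) := pvGetD_int _ _ ht0
    have hs : fi + PySem.List.pyGetD g x 0 = pvF i + pvF x.toNat := by
      rw [hfi, pvGetD_int _ _ hx0]
      have hx' := htab x.toNat (by omega)
      simp only [pvVal] at hx'
      rw [hx']
    have hgx : (let s := fi + PySem.List.pyGetD g x 0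
        if s < PySem.List.pyGetD g (t x) 0 then PySem.List.pySetD g (t x) s else g)
        = if fi + PySem.List.pyGetD g x 0 < PySem.List.pyGetD g (t x) 0
          then g.set ((t x).toNat) (fi + PySem.List.pyGetD g x 0) else g := by
      simp only []
      split_ifs with h
      · exact PySem.List.pySetD_of_nonneg _ _ ht0
      · rfl
    rw [List.foldl_cons, hgx]
    by_cases hbr : fi + PySem.List.pyGetD g x 0 < PySem.List.pyGetD g (t x) 0
    · rw [if_pos hbr]
      have hlen' : (g.set ((t x).toNat) (fi + PySem.List.pyGetD g x 0)).length = N + 1 := by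
        rw [List.length_set]; exact hlen
      have htab' : ∀ k : Nat, k ≤ i →
          pvVal (g.set ((t x).toNat) (fi + PySem.List.pyGetD g x 0)) k = pvF k := by
        intro k hk
        rw [pvVal_set, if_neg (by omega)]
        exact htab k hk
      have hlow' : ∀ k : Nat, k ≤ N →
          pvF k ≤ pvVal (g.set ((t x).toNat) (fi + PySem.List.pyGetD g x 0)) k := by
        intro k hk
        rw [pvVal_set]
        split_ifs with hcase
        · rw [hs, ← hcase.1]; exact hxF
        · exact hlow k hk
      obtain ⟨I1, I2, I3, I4, I5⟩ := ih (fun j hj => hjb j (List.mem_cons_of_mem _ hj))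
        (fun j hj => htgt j (List.mem_cons_of_mem _ hj))
        (fun j hj => htN j (List.mem_cons_of_mem _ hj))
        (fun j hj => hF j (List.mem_cons_of_mem _ hj)) hlen' htab' hlow'
      refine ⟨I1, ?_, I3, I4, ?_⟩
      · intro k
        refine le_trans (I2 k) ?_
        rw [pvVal_set]
        split_ifs with hcase
        · rw [← hcase.1]; rw [hgtx] at hbr; exact le_of_lt hbr
        · exact le_refl _
      · intro j hj
        rcases List.mem_cons.mp hj with rfl | hj'
        · refine le_trans (I2 ((t j).toNat)) ?_
          rw [pvVal_set, if_pos ⟨rfl, htxN⟩, hs]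
        · exact I5 j hj'
    · rw [if_neg hbr]
      obtain ⟨I1, I2, I3, I4, I5⟩ := ih (fun j hj => hjb j (List.mem_cons_of_mem _ hj))
        (fun j hj => htgt j (List.mem_cons_of_mem _ hj))
        (fun j hj => htN j (List.mem_cons_of_mem _ hj))
        (fun j hj => hF j (List.mem_cons_of_mem _ hj)) hlen htab hlow
      refine ⟨I1, I2, I3, I4, ?_⟩
      intro j hj
      rcases List.mem_cons.mp hj with rfl | hj'
      · refine le_trans (I2 ((t j).toNat)) ?_
        rw [← hgtx, ← hs]
        omega
      · exact I5 j hj'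

lemma pvStepB_inv {n : Int} (hn : 1 ≤ n) {m : Nat} (hm : m < n.toNat) {g : List Int}
    (h : pvInv n.toNat m g) : pvInv n.toNat (m+1) (pvStepB n g ((m : Int) + 1)) := by
  obtain ⟨N, rfl⟩ : ∃ N : Nat, n = (N : Int) := ⟨n.toNat, by omega⟩
  simp only [Int.toNat_natCast] at hm h ⊢
  have hiN : m + 1 ≤ N := by omega
  obtain ⟨hlen, hlow, hup, hU⟩ := h
  have htabg : ∀ k : Nat, k ≤ m + 1 → pvVal g k = pvF k := fun k hk =>
    pvInv_tab ⟨hlen, hlow, hup, hU⟩ k (by omega) hk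
  have hfi : PySem.List.pyGetD g ((m : Int) + 1) 0 = pvF (m+1) := by
    have h1 := htabg (m+1) (le_refl _)
    simp only [pvVal] at h1
    rw [pvGetD_int _ _ (by positivity), show ((m : Int) + 1).toNat = m + 1 by omega, h1]
  have hrw : pvStepB (N : Int) g ((m : Int) + 1) =
      (PySem.List.pyRange 2 (min ((m : Int) + 1) (PySem.Int.floordiv (N : Int) ((m : Int) + 1)) + 1) 1).foldl
        (fun f j =>
          let s := PySem.List.pyGetD g ((m : Int) + 1) 0 + PySem.List.pyGetD f j 0
          if s < PySem.List.pyGetD f (((m : Int) + 1) * j) 0 then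
            PySem.List.pySetD f (((m : Int) + 1) * j) s else f)
        ((PySem.List.pyRange 1 (min ((m : Int) + 1) ((N : Int) - ((m : Int) + 1)) + 1) 1).foldl
          (fun f j =>
            let s := PySem.List.pyGetD g ((m : Int) + 1) 0 + PySem.List.pyGetD f j 0
            if s < PySem.List.pyGetD f (((m : Int) + 1) + j) 0 then
              PySem.List.pySetD f (((m : Int) + 1) + j) s else f) g) := rfl
  rw [hrw]
  obtain ⟨S1, S2, S3, S4, S5⟩ := pvRelaxLoop (N := N) (i := m+1) hiN
    (PySem.List.pyGetD g ((m : Int) + 1) 0) (fun j => ((m : Int) + 1) + j) hfi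
    (PySem.List.pyRange 1 (min ((m : Int) + 1) ((N : Int) - ((m : Int) + 1)) + 1) 1)
    (by intro j hj; rw [PySem.List.mem_pyRange_one] at hj; push_cast; omega)
    (by intro j hj; rw [PySem.List.mem_pyRange_one] at hj; simp only []; push_cast; omega)
    (by intro j hj; rw [PySem.List.mem_pyRange_one] at hj; simp only []; omega)
    (by intro j hj; rw [PySem.List.mem_pyRange_one] at hj
        simp only []
        rw [show ((((m : Int) + 1) + j)).toNat = (m + 1) + j.toNat by omega]
        exact pvF_le_sum (by omega) (by omega))
    hlen (fun k hk => htabg k hk) hlow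
  obtain ⟨P1, P2, P3, P4, P5⟩ := pvRelaxLoop (N := N) (i := m+1) hiN
    (PySem.List.pyGetD g ((m : Int) + 1) 0) (fun j => ((m : Int) + 1) * j) hfi
    (PySem.List.pyRange 2 (min ((m : Int) + 1) (PySem.Int.floordiv (N : Int) ((m : Int) + 1)) + 1) 1)
    (by intro j hj; rw [PySem.List.mem_pyRange_one] at hj; push_cast; omega)
    (by intro j hj; rw [PySem.List.mem_pyRange_one] at hj
        simp only []
        obtain ⟨jn, rfl⟩ : ∃ jn : Nat, j = (jn : Int) := ⟨j.toNat, by omega⟩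
        have h2 : (2 : Int) ≤ (jn : Int) := hj.1
        push_cast
        nlinarith [Int.natCast_nonneg m])
    (by intro j hj; rw [PySem.List.mem_pyRange_one] at hj
        simp only []
        have hjd : j ≤ PySem.Int.floordiv (N : Int) ((m : Int) + 1) := by omega
        have hmul : j * (((m : Int) + 1)) ≤ (N : Int) :=
          (PySem.Int.le_floordiv_iff_mul_le (by positivity)).mp hjd
        have hmul' : (((m : Int) + 1)) * j ≤ (N : Int) := by
          rw [mul_comm]; exact hmul
        omega)
    (by intro j hj; rw [PySem.List.mem_pyRange_one] at hj
        simp only []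
        have hji : j ≤ ((m : Int) + 1) := by omega
        obtain ⟨jn, rfl⟩ : ∃ jn : Nat, j = (jn : Int) := ⟨j.toNat, by omega⟩
        have h2jn : 2 ≤ jn := by exact_mod_cast hj.1
        have hjm : jn ≤ m + 1 := by exact_mod_cast hji
        rw [show ((((m : Int) + 1)) * (jn : Int)).toNat = (m + 1) * jn by
          rw [show ((m : Int) + 1) = ((m + 1 : Nat) : Int) by push_cast; ring, ← Nat.cast_mul,
            Int.toNat_natCast], Int.toNat_natCast]
        exact pvF_le_prod (by omega) h2jn)
    S1 (fun k hk => S3 k hk) S4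
  refine ⟨P1, P4, ?_, ?_⟩
  · intro k hk
    exact le_trans (P2 k) (le_trans (S2 k) (hup k hk))
  · intro k a b hk hba ham hpair
    rcases Nat.lt_or_ge a (m+1) with ha' | ha'
    · exact le_trans (P2 k) (le_trans (S2 k) (hU k a b hk hba (by omega) hpair))
    · have haeq : a = m + 1 := by omega
      subst haeq
      rcases hpair with ⟨hab, hb1⟩ | ⟨hab, hb2⟩
      · have hmem : (b : Int) ∈ PySem.List.pyRange 1
            (min ((m : Int) + 1) ((N : Int) - ((m : Int) + 1)) + 1) 1 := by
          rw [PySem.List.mem_pyRange_one]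
          have h1 : (b : Int) ≤ (m : Int) + 1 := by exact_mod_cast hba
          have h2 : (b : Int) ≤ (N : Int) - ((m : Int) + 1) := by omega
          have h3 : (1 : Int) ≤ (b : Int) := by exact_mod_cast hb1
          omega
        have h5 := S5 (b : Int) hmem
        simp only [Int.toNat_natCast] at h5
        rw [show ((((m : Int) + 1) + (b : Int))).toNat = k by omega] at h5
        exact le_trans (P2 k) h5
      · have hmem : (b : Int) ∈ PySem.List.pyRange 2
            (min ((m : Int) + 1) (PySem.Int.floordiv (N : Int) ((m : Int) + 1)) + 1) 1 := by
          rw [PySem.List.mem_pyRange_one]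
          have h1 : (b : Int) ≤ (m : Int) + 1 := by exact_mod_cast hba
          have h2 : (b : Int) ≤ PySem.Int.floordiv (N : Int) ((m : Int) + 1) := by
            rw [PySem.Int.le_floordiv_iff_mul_le (by positivity)]
            have hbk : b * (m + 1) ≤ N := by rw [Nat.mul_comm]; omega
            have : ((b * (m + 1) : Nat) : Int) ≤ (N : Int) := by exact_mod_cast hbk
            push_cast at this
            linarith
          have h3 : (2 : Int) ≤ (b : Int) := by exact_mod_cast hb2
          omega
        have h5 := P5 (b : Int) hmem
        simp only [Int.toNat_natCast] at h5
        rw [show ((((m : Int) + 1) * (b : Int))).toNat = k by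
          rw [show (((m : Int) + 1)) * (b : Int) = ((k : Nat) : Int) by
            rw [← hab]; push_cast; ring]
          exact Int.toNat_natCast k] at h5
        exact h5

lemma pushLoop {n : Int} (hn : 1 ≤ n) {m : Nat} (hm : m ≤ n.toNat) :
    pvInv n.toNat m ((PySem.List.pyRange 1 ((m : Int) + 1) 1).foldl (pvStepB n)
      (PySem.List.pyRange 0 (n + 1) 1)) := by
  induction m with
  | zero =>
    rw [show ((0:Nat):Int) + 1 = (1:Int) by norm_num,
      show PySem.List.pyRange 1 1 1 = [] from PySem.List.pyRange_one_eq_nil (le_refl _),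
      List.foldl_nil]
    have hval : ∀ k : Nat, k ≤ n.toNat → pvVal (PySem.List.pyRange 0 (n + 1) 1) k = (k : Int) := by
      intro k hk
      simp only [pvVal]
      rw [PySem.List.pyRange_zero]
      rw [List.getD_eq_getElem _ _ (by simp only [List.length_map, List.length_range]; omega)]
      simp only [List.getElem_map, List.getElem_range]
    refine ⟨?_, ?_, ?_, ?_⟩
    · rw [PySem.List.length_pyRange_one]; omega
    · intro k hk
      rw [hval k hk]; exact pvF_le_self k
    · intro k hk
      rw [hval k hk]
    · intro k a b hk hba ham hpair
      rcases hpair with ⟨h1, h2⟩ | ⟨h1, h2⟩ <;> omega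
  | succ m ih =>
    have ihh := ih (by omega)
    rw [show ((↑(m+1):Int) + 1) = ((↑m + 1) + 1 : Int) by push_cast; ring]
    rw [show PySem.List.pyRange 1 ((↑m + 1) + 1) 1
        = PySem.List.pyRange 1 ((↑m : Int) + 1) 1 ++ [(↑m : Int) + 1] from
      PySem.List.pyRange_one_succ_right (by omega)]
    rw [List.foldl_append, List.foldl_cons, List.foldl_nil]
    exact pvStepB_inv hn (by omega) ihh

lemma push_eq {n : Int} (hn : 1 ≤ n) : minOnes_alt n = pvF n.toNat := by
  obtain ⟨N, rfl⟩ : ∃ N : Nat, n = (N : Int) := ⟨n.toNat, by omega⟩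
  rw [minOnes_alt_eq_loop]
  have hL := pushLoop hn (m := N) (by simp)
  simp only [Int.toNat_natCast] at hL
  have hv := pvInv_tab hL N (le_refl _) (by omega)
  simp only [pvVal] at hv
  rw [pvGetD_int _ _ (by positivity)]
  simp only [Int.toNat_natCast]
  exact hv

-- ===== VERDICT (by name: the statement is the Claim_ definition above) =====
theorem minOnes_spec : Claim_equal_minOnes := by
  intro n _ hpre
  unfold Spec_minOnes
  rw [pull_eq hpre, push_eq hpre]
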